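-- pv_equiv track=rewrite | github.com/MaximHirschmann/project-euler-solutions | Python/792.py | bin_helper
-- ===== SOURCE A (Python) =====
-- def bin_helper(k):
--     p1 = 1
--     p2 = 1
--     for i in range(1, k+1):
--         p1 *= i
--     for i in range(k+1, 2*k+1):
--         p2 *= i
--     return p2 // p1
-- ===== SOURCE B (Python) =====
-- def bin_helper(k):
--     res = 1
--     for i in range(1, k + 1):
--         res = res * (k + i) // i
--     return res
-- ===== Notes on version B (the rewrite author's own statement) =====
-- stated objective: simpler
-- what changed: Replaces the two factorial-product loops and final big division by a single loop maintaining a running binomial coefficient res = C(k+i,i) via res = res*(k+i)//i, so each division is exact and intermediate numbers stay small.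
import Mathlib
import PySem

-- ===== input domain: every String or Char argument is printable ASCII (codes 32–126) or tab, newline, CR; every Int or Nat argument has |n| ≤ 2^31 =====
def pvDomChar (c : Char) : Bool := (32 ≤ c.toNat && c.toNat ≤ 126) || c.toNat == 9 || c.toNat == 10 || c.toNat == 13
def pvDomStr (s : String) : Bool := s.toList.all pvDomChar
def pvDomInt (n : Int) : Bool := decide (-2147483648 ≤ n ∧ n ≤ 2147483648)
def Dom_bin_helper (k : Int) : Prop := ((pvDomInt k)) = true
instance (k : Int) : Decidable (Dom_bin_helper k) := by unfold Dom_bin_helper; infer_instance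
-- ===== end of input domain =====

-- B replaces A's two factorial-product loops and final division by one loop keeping a
-- running binomial coefficient (res = res*(k+i)//i, each division exact): simpler, one pass.

-- ===== PORT A =====
def bin_helper (k : Int) : Int :=
  let p1 := (PySem.List.pyRange 1 (k + 1) 1).foldl (fun p i => p * i) 1
  let p2 := (PySem.List.pyRange (k + 1) (2 * k + 1) 1).foldl (fun p i => p * i) 1
  PySem.Int.floordiv p2 p1

-- ===== PORT B =====
def bin_helper_alt (k : Int) : Int :=
  (PySem.List.pyRange 1 (k + 1) 1).foldl (fun res i => PySem.Int.floordiv (res * (k + i)) i) 1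

-- ===== PRECONDITION & SPEC =====
def Spec_bin_helper (k : Int) (out : Int) : Prop := out = bin_helper_alt k
instance (k : Int) (out : Int) : Decidable (Spec_bin_helper k out) := by unfold Spec_bin_helper; infer_instance

-- ===== CLAIM (what is proved, stated in full; the proofs are below) =====
def Claim_equal_bin_helper : Prop := ∀ (k : Int), Dom_bin_helper k → Spec_bin_helper k (bin_helper k)

-- ===== LEMMAS AND PROOFS =====

-- product of an integer range as a Finset product
theorem pv_prod_pyRange (a : Int) (m : Nat) :
    (PySem.List.pyRange a (a + m) 1).foldl (fun p i => p * i) 1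
      = ∏ i ∈ Finset.range m, (a + (i : Int)) := by
  induction m with
  | zero => simp [PySem.List.pyRange_one_eq_nil]
  | succ m ih =>
      have h : a ≤ a + (m : Nat) := by
        have : (0 : Int) ≤ (m : Nat) := Int.natCast_nonneg m
        omega
      have hsplit : (PySem.List.pyRange a (a + (m + 1 : Nat)) 1)
          = PySem.List.pyRange a (a + (m : Nat)) 1 ++ [a + (m : Nat)] := by
        have := PySem.List.pyRange_one_succ_right (a := a) (b := a + (m : Nat)) h
        rw [← this]; congr 1; push_cast; ring
      rw [hsplit, List.foldl_append, ih]
      simp [Finset.prod_range_succ]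

-- (a+m)! = a! * (a+1)(a+2)…(a+m)
theorem pv_fact_mul (a m : Nat) :
    a.factorial * ∏ i ∈ Finset.range m, (a + 1 + i) = (a + m).factorial := by
  induction m with
  | zero => simp
  | succ m ih =>
      rw [Finset.prod_range_succ, ← mul_assoc, ih]
      have : a + (m + 1) = (a + m) + 1 := by omega
      rw [this, Nat.factorial_succ]
      ring_nf

-- A's first product is n!
theorem pv_p1 (n : Nat) :
    (∏ i ∈ Finset.range n, ((1 : Int) + (i : Int))) = (n.factorial : Int) := by
  have h := pv_fact_mul 0 n
  simp at h
  rw [← h]; push_cast; ring_nf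

-- A's second product is C(2n,n) * n!
theorem pv_p2 (n : Nat) :
    (∏ i ∈ Finset.range n, (((n : Int) + 1) + (i : Int)))
      = ((Nat.choose (2 * n) n) * n.factorial : Nat) := by
  have h := pv_fact_mul n n
  have hc := Nat.choose_mul_factorial_mul_factorial (show n ≤ 2 * n by omega)
  have h2 : n + n = 2 * n := by omega
  rw [h2] at h
  have h3 : 2 * n - n = n := by omega
  rw [h3] at hc
  -- n.factorial * prod = choose * n! * n!
  have key : n.factorial * ∏ i ∈ Finset.range n, (n + 1 + i)
      = Nat.choose (2 * n) n * n.factorial * n.factorial := by rw [h, ← hc]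
  have hf : 0 < n.factorial := Nat.factorial_pos n
  have key2 : (∏ i ∈ Finset.range n, (n + 1 + i)) = Nat.choose (2 * n) n * n.factorial := by
    have := Nat.eq_of_mul_eq_mul_left hf (by linarith [key] : n.factorial * (∏ i ∈ Finset.range n, (n + 1 + i)) = n.factorial * (Nat.choose (2 * n) n * n.factorial))
    exact this
  rw [← key2]; push_cast; ring_nf

-- B's loop invariant: after processing 1..m the accumulator is C(n+m, m)
theorem pv_alt_loop (n : Nat) (m : Nat) :
    (PySem.List.pyRange 1 (1 + (m : Int)) 1).foldl
        (fun res i => PySem.Int.floordiv (res * ((n : Int) + i)) i) 1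
      = (Nat.choose (n + m) m : Int) := by
  induction m with
  | zero => simp [PySem.List.pyRange_one_eq_nil]
  | succ m ih =>
      have h : (1 : Int) ≤ 1 + (m : Nat) := by have := Int.natCast_nonneg m; omega
      have hsplit : PySem.List.pyRange 1 (1 + ((m : Nat) + 1 : Int)) 1
          = PySem.List.pyRange 1 (1 + (m : Nat)) 1 ++ [(1 + (m : Nat) : Int)] := by
        have := PySem.List.pyRange_one_succ_right (a := 1) (b := 1 + (m : Nat)) h
        rw [← this]; congr 1
      have hcast : ((m : Nat) + 1 : Int) = (((m + 1 : Nat) : Int)) := by push_cast; ring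
      rw [← hcast, hsplit, List.foldl_append, ih]
      simp only [List.foldl_cons, List.foldl_nil]
      have hid : (Nat.choose (n + m) m : Int) * ((n : Int) + (1 + (m : Nat)))
          = (Nat.choose (n + (m + 1)) (m + 1) : Int) * (1 + (m : Nat)) := by
        have := Nat.add_one_mul_choose_eq (n + m) m
        have h2 : (Nat.succ (n + m)) * Nat.choose (n + m) m
            = Nat.choose (n + (m + 1)) (m + 1) * (m + 1) := by
          simpa [Nat.succ_eq_add_one, show n + m + 1 = n + (m + 1) by omega] using this
        have := congrArg (fun x : Nat => (x : Int)) h2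
        push_cast at this ⊢
        linarith [this]
      have hpos : (0 : Int) < 1 + (m : Nat) := by have := Int.natCast_nonneg m; omega
      rw [hid, PySem.Int.floordiv_eq_ediv_of_pos hpos,
        Int.mul_ediv_cancel _ (by omega : (1 : Int) + (m : Nat) ≠ 0)]

-- A computes C(2n,n) for k = n ≥ 0
theorem pv_A_value (n : Nat) : bin_helper (n : Int) = (Nat.choose (2 * n) n : Int) := by
  unfold bin_helper
  have e1 : ((n : Int) + 1) = 1 + (n : Nat) := by ring
  have e2 : (2 * (n : Int) + 1) = ((n : Int) + 1) + (n : Nat) := by ring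
  simp only [e1, e2]
  rw [show ((1 : Int) + (n : Nat)) = 1 + (n : Nat) from rfl,
      pv_prod_pyRange 1 n, pv_prod_pyRange (1 + (n : Nat)) n]
  have hp1 : (∏ i ∈ Finset.range n, ((1 : Int) + (i : Int))) = (n.factorial : Int) := pv_p1 n
  have hp2 : (∏ i ∈ Finset.range n, (((1 : Int) + (n : Nat)) + (i : Int)))
      = (Nat.choose (2 * n) n : Int) * (n.factorial : Int) := by
    have := pv_p2 n
    have e3 : ∀ i : Nat, ((1 : Int) + (n : Nat)) + (i : Int) = ((n : Int) + 1) + (i : Int) := by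
      intro i; ring
    rw [Finset.prod_congr rfl (fun i _ => e3 i), this]; push_cast; ring
  rw [hp1, hp2]
  have hf : (0 : Int) < (n.factorial : Int) := by exact_mod_cast Nat.factorial_pos n
  rw [PySem.Int.floordiv_eq_ediv_of_pos hf, Int.mul_ediv_cancel _ (by omega)]

theorem pv_B_value (n : Nat) : bin_helper_alt (n : Int) = (Nat.choose (2 * n) n : Int) := by
  unfold bin_helper_alt
  have e1 : ((n : Int) + 1) = 1 + (n : Nat) := by ring
  rw [e1, pv_alt_loop n n]
  congr 2
  omega

-- ===== VERDICT (by name: the statement is the Claim_ definition above) =====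
theorem bin_helper_spec : Claim_equal_bin_helper := by
  intro k _
  unfold Spec_bin_helper
  by_cases hk : 0 ≤ k
  · lift k to Nat using hk with n
    rw [pv_A_value n, pv_B_value n]
  · have hk' : k < 0 := by omega
    have h1 : k + 1 ≤ 1 := by omega
    have h2 : 2 * k + 1 ≤ k + 1 := by omega
    unfold bin_helper bin_helper_alt
    rw [PySem.List.pyRange_one_eq_nil h1, PySem.List.pyRange_one_eq_nil h2]
    simp [PySem.Int.floordiv]
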